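-- pv_equiv track=rewrite | github.com/23AIBox/RL-GenRisk | src/inputall.py | getGene
-- ===== SOURCE A (Python) =====
-- def getGene(patients):
--     gene_dic = {}
--     for patient in list(patients.keys()):
--         genes = patients[patient]
--         for gene in genes:
--             if gene not in list(gene_dic.keys()):
--                 gene_dic[gene] = [patient]
--             else:
--                 gene_dic[gene].append(patient)
--     return gene_dic
-- ===== SOURCE B (Python) =====
-- def getGene(patients):
--     # Flatten to (gene, patient) pairs, list genes in first-encounter order,
--     # then build each gene's patient list by a filtering pass over the pairs.
--     pairs = [(g, p) for p, gs in patients.items() for g in gs]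
--     order = []
--     for g, _ in pairs:
--         if g not in order:
--             order.append(g)
--     return {g: [p for h, p in pairs if h == g] for g in order}
-- ===== Notes on version B (the rewrite author's own statement) =====
-- stated objective: alternative
-- what changed: A grows an inverted index incrementally (per-gene dict insert/append inside nested loops); B flattens to a (gene, patient) pair list, computes the first-encounter gene order, and builds each gene's patient list by a separate filtering pass over the pairs.
import Mathlib
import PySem

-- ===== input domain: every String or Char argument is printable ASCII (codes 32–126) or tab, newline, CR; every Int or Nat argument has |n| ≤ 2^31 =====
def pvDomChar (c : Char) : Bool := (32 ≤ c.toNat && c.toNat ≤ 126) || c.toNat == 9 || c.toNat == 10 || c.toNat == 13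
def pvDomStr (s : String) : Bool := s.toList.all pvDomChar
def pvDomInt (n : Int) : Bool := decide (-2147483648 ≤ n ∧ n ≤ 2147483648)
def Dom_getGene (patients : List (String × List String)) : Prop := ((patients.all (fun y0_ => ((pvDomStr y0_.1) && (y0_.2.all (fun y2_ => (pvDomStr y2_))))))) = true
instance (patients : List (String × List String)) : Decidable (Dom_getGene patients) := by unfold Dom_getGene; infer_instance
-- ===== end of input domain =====

-- B builds the inverted index by a flatten / first-encounter-order / per-gene filter pipeline
-- instead of A's incrementally grown dict (objective: alternative, same cost).

-- ===== PORT A =====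
def getGene (patients : List (String × List String)) : List (String × List String) :=
  (patients.foldl
    (fun gene_dic pg =>
      pg.2.foldl
        (fun gene_dic gene =>
          if gene ∉ gene_dic.keys then
            gene_dic.insert gene [pg.1]
          else
            gene_dic.modify gene [] (fun ps => ps ++ [pg.1]))
        gene_dic)
    (PySem.Dict.empty : PySem.Dict String (List String))).items

-- ===== PORT B =====
def getGene_alt (patients : List (String × List String)) : List (String × List String) :=
  let pairs := patients.flatMap (fun pg => pg.2.map (fun g => (g, pg.1)))
  let order := pairs.foldl (fun order gp => if gp.1 ∈ order then order else order ++ [gp.1]) []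
  order.map (fun g => (g, (pairs.filter (fun hp => hp.1 == g)).map (fun hp => hp.2)))

-- ===== PRECONDITION & SPEC =====
-- The association list encodes the Python dict argument, whose keys (patient ids) are
-- necessarily distinct; lists with duplicate keys represent no Python input.
def Pre_getGene (patients : List (String × List String)) : Prop :=
  (patients.map Prod.fst).Nodup
instance (patients : List (String × List String)) : Decidable (Pre_getGene patients) := by unfold Pre_getGene; infer_instance
def pvWitness_getGene : (List (String × List String)) :=
  [("p1", ["g1", "g2"]), ("p2", ["g2", "g1", "g2"]), ("p3", [])]
def Spec_getGene (patients : List (String × List String)) (out : List (String × List String)) : Prop := out = getGene_alt patients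
instance (patients : List (String × List String)) (out : List (String × List String)) : Decidable (Spec_getGene patients out) := by unfold Spec_getGene; infer_instance

-- ===== CLAIM (what is proved, stated in full; the proofs are below) =====
def Claim_equal_getGene : Prop := ∀ (patients : List (String × List String)), Dom_getGene patients → Pre_getGene patients → Spec_getGene patients (getGene patients)

-- ===== LEMMAS AND PROOFS =====

-- A's branch (insert fresh key / append to existing) is one dict.modify step.
theorem getGene_step_eq (d : PySem.Dict String (List String)) (g p : String) :
    (if g ∉ d.keys then d.insert g [p] else d.modify g [] (fun ps => ps ++ [p]))
      = d.modify g [] (fun ps => ps ++ [p]) := by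
  split_ifs with h
  · rfl
  · have hc : d.contains g = false := by
      cases hcg : d.contains g
      · rfl
      · exact absurd ((PySem.Dict.contains_iff_mem_keys d g).mp hcg) h
    unfold PySem.Dict.modify
    rw [PySem.Dict.getD_of_not_contains d [] hc]
    simp

-- the nested patient/gene loops are one loop over the flattened (gene, patient) pairs
theorem getGene_nested_flat (l : List (String × List String)) (d : PySem.Dict String (List String)) :
    l.foldl (fun d pg => pg.2.foldl (fun d g => d.modify g [] (fun ps => ps ++ [pg.1])) d) d
      = (l.flatMap (fun pg => pg.2.map (fun g => (g, pg.1)))).foldl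
          (fun d q => d.modify q.1 [] (fun ps => ps ++ [q.2])) d := by
  induction l generalizing d with
  | nil => rfl
  | cons x xs ih =>
      simp only [List.foldl_cons, List.flatMap_cons, List.foldl_append, List.foldl_map]
      exact ih _

theorem getGene_spec_aux (patients : List (String × List String)) :
    getGene patients = getGene_alt patients := by
  unfold getGene getGene_alt
  set pairs := patients.flatMap (fun pg => pg.2.map (fun g => (g, pg.1))) with hpairs
  -- A side: branch = modify, nested loops = flat loop
  have hA : patients.foldl
      (fun gene_dic pg =>
        pg.2.foldl
          (fun gene_dic gene =>
            if gene ∉ gene_dic.keys then gene_dic.insert gene [pg.1]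
            else gene_dic.modify gene [] (fun ps => ps ++ [pg.1])) gene_dic)
      (PySem.Dict.empty : PySem.Dict String (List String))
      = pairs.foldl (fun d q => d.modify q.1 [] (fun ps => ps ++ [q.2])) PySem.Dict.empty := by
    rw [← getGene_nested_flat]
    apply PySem.List.foldl_congr_mem'
    intro pg _ d
    apply PySem.List.foldl_congr_mem'
    intro g _ d'
    exact getGene_step_eq d' g pg.1
  rw [hA]
  set D := pairs.foldl (fun d q => d.modify q.1 [] (fun ps => ps ++ [q.2])) PySem.Dict.empty with hD
  have hnodup : D.keys.Nodup := by
    rw [hD]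
    exact PySem.Dict.nodup_keys_foldl_modify_key pairs Prod.fst []
      (fun _ q => fun ps => ps ++ [q.2]) PySem.Dict.empty (by simp [PySem.Dict.keys_empty])
  have hkeys : D.keys = PySem.Set.ofList (pairs.map Prod.fst) := by
    rw [hD]
    rw [PySem.Dict.keys_foldl_modify_key pairs Prod.fst []
      (fun _ q => fun ps => ps ++ [q.2]) PySem.Dict.empty]
    simp [PySem.Dict.keys_empty, PySem.Set.update_nil_left]
  -- B's first-encounter order loop is Set.ofList of the flattened gene list
  have horder : pairs.foldl (fun order gp => if gp.1 ∈ order then order else order ++ [gp.1]) []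
      = PySem.Set.ofList (pairs.map Prod.fst) := by
    rw [← PySem.Set.update_nil_left (pairs.map Prod.fst)]
    rw [PySem.Set.update_map_eq_foldl_add]
    apply PySem.List.foldl_congr_mem'
    intro q _ s
    exact (PySem.Set.add_eq_ite s q.1).symm
  rw [PySem.Dict.items_eq_map_keys D hnodup [], hkeys]
  show _ = List.map (fun g => (g, (pairs.filter (fun hp => hp.1 == g)).map (fun hp => hp.2)))
        (pairs.foldl (fun order gp => if gp.1 ∈ order then order else order ++ [gp.1]) [])
  rw [horder]
  apply List.map_congr_left
  intro g _
  rw [hD, PySem.Dict.getD_foldl_modify_append]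
  simp [PySem.Dict.getD_empty]

-- ===== VERDICT (by name: the statement is the Claim_ definition above) =====
theorem getGene_spec : Claim_equal_getGene := by
  intro patients _ _
  unfold Spec_getGene
  exact getGene_spec_aux patients
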